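-- pv_equiv track=rewrite | github.com/yyxnlin/esc180 | labs/lab6.py | get_memory
-- ===== SOURCE A (Python) =====
-- def E(x0, x1, x2, w01, w02, w12):
--     term1 = x0 * x1 * w01
--     term2 = x0 * x2 * w02
--     term3 = x1 * x2 * w12
--     return -(term1 + term2 + term3)
--
-- def get_memory(x0, x1, x2, w01, w02, w12):
--     memory = []
--     cur_min = 100000
--     for x0 in [-1, 1]:
--         for x1 in [-1, 1]:
--             for x2 in [-1, 1]:
--                 if(E(x0, x1, x2, w01, w02, w12) < cur_min):
--                     cur_min = E(x0, x1, x2, w01, w02, w12)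
--                     memory = [[x0, x1, x2]]
--                 elif(E(x0, x1, x2, w01, w02, w12) == cur_min):
--                     memory.append([x0, x1, x2])
--     return memory
-- ===== SOURCE B (Python) =====
-- def E(x0, x1, x2, w01, w02, w12):
--     term1 = x0 * x1 * w01
--     term2 = x0 * x2 * w02
--     term3 = x1 * x2 * w12
--     return -(term1 + term2 + term3)
--
-- def get_memory(x0, x1, x2, w01, w02, w12):
--     # Materialize the 8 configurations with their energies, compute one
--     # threshold (min of all energies together with the 100000 cap), then
--     # filter the table.  Same iteration order as the nested loops.
--     table = [([a, b, c], E(a, b, c, w01, w02, w12))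
--              for a in (-1, 1) for b in (-1, 1) for c in (-1, 1)]
--     threshold = min([e for _, e in table] + [100000])
--     return [cfg for cfg, e in table if e == threshold]
-- ===== Notes on version B (the rewrite author's own statement) =====
-- stated objective: simpler
-- what changed: Replaces the incremental running-min with reset-or-append state machine by materializing the 8 (config, energy) pairs, taking one threshold = min(energies + [100000]), and filtering the table.
import Mathlib
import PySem

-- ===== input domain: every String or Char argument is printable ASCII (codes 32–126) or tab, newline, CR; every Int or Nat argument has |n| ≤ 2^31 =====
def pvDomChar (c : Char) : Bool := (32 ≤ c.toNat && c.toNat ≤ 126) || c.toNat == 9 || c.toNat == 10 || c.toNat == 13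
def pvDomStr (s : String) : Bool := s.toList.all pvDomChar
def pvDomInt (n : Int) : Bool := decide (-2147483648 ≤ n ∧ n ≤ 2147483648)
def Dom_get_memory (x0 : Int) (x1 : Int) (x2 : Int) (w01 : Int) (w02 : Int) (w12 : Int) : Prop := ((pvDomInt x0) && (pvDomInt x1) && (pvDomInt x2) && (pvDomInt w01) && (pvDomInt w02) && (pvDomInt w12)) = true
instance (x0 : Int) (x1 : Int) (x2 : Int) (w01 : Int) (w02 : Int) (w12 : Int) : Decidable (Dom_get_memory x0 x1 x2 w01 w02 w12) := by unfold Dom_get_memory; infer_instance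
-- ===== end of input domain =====

-- B replaces A's incremental running-min with reset-or-append state by a
-- materialized (config, energy) table, one threshold = min(energies + [100000]),
-- and a filter; objective: simpler.


-- ===== PORT A =====
-- helper E shared by both Pythons
def pvE (a b c w01 w02 w12 : Int) : Int :=
  -(a * b * w01 + a * c * w02 + b * c * w12)

-- one iteration of A's innermost loop body, on state (memory, cur_min)
def pvStep (w01 w02 w12 : Int) (st : List (List Int) × Int) (c : Int × Int × Int) :
    List (List Int) × Int :=
  let e := pvE c.1 c.2.1 c.2.2 w01 w02 w12
  if e < st.2 then ([[c.1, c.2.1, c.2.2]], e)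
  else if e = st.2 then (st.1 ++ [[c.1, c.2.1, c.2.2]], st.2)
  else st

def get_memory (x0 : Int) (x1 : Int) (x2 : Int) (w01 : Int) (w02 : Int) (w12 : Int) : List (List Int) :=
  (([(-1 : Int), 1]).foldl (fun st a =>
    ([(-1 : Int), 1]).foldl (fun st b =>
      ([(-1 : Int), 1]).foldl (fun st c => pvStep w01 w02 w12 st (a, b, c)) st) st)
    ([], 100000)).1

-- ===== PORT B =====
-- the comprehension [[a,b,c] for a in (-1,1) for b in (-1,1) for c in (-1,1)]
def pvConfigs : List (Int × Int × Int) :=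
  ([(-1 : Int), 1]).flatMap (fun a =>
    ([(-1 : Int), 1]).flatMap (fun b =>
      ([(-1 : Int), 1]).map (fun c => (a, b, c))))

def get_memory_alt (x0 : Int) (x1 : Int) (x2 : Int) (w01 : Int) (w02 : Int) (w12 : Int) : List (List Int) :=
  let table := pvConfigs.map (fun c => ([c.1, c.2.1, c.2.2], pvE c.1 c.2.1 c.2.2 w01 w02 w12))
  -- Python's min(energies + [100000]) ported as folding Int min with initial 100000:
  -- exact, since on Int values min is commutative/associative and ties carry equal values.
  let threshold := (table.map Prod.snd).foldl min 100000
  (table.filter (fun p => p.2 == threshold)).map Prod.fst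

-- ===== PRECONDITION & SPEC =====
def Spec_get_memory (x0 : Int) (x1 : Int) (x2 : Int) (w01 : Int) (w02 : Int) (w12 : Int) (out : List (List Int)) : Prop := out = get_memory_alt x0 x1 x2 w01 w02 w12
instance (x0 : Int) (x1 : Int) (x2 : Int) (w01 : Int) (w02 : Int) (w12 : Int) (out : List (List Int)) : Decidable (Spec_get_memory x0 x1 x2 w01 w02 w12 out) := by unfold Spec_get_memory; infer_instance

-- ===== CLAIM (what is proved, stated in full; the proofs are below) =====
def Claim_equal_get_memory : Prop := ∀ (x0 : Int) (x1 : Int) (x2 : Int) (w01 : Int) (w02 : Int) (w12 : Int), Dom_get_memory x0 x1 x2 w01 w02 w12 → Spec_get_memory x0 x1 x2 w01 w02 w12 (get_memory x0 x1 x2 w01 w02 w12)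

-- ===== LEMMAS AND PROOFS =====

theorem pv_foldl_min_le (l : List Int) (a : Int) : l.foldl min a ≤ a := by
  induction l generalizing a with
  | nil => simp
  | cons x t ih => exact le_trans (ih (min a x)) (min_le_left a x)

-- loop invariant for A's fold: final cur_min is the running min, final memory is
-- (old memory, kept iff the min did not drop) ++ the configs attaining the final min
theorem pv_loop_inv (w01 w02 w12 : Int) (cs : List (Int × Int × Int))
    (mem : List (List Int)) (m : Int) :
    cs.foldl (pvStep w01 w02 w12) (mem, m) =
      ((if (cs.map (fun c => pvE c.1 c.2.1 c.2.2 w01 w02 w12)).foldl min m = m then mem else []) ++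
        (cs.filter (fun c =>
          pvE c.1 c.2.1 c.2.2 w01 w02 w12 ==
            (cs.map (fun c => pvE c.1 c.2.1 c.2.2 w01 w02 w12)).foldl min m)).map
          (fun c => [c.1, c.2.1, c.2.2]),
       (cs.map (fun c => pvE c.1 c.2.1 c.2.2 w01 w02 w12)).foldl min m) := by
  induction cs generalizing mem m with
  | nil => simp
  | cons c t ih =>
    have e := pvE c.1 c.2.1 c.2.2 w01 w02 w12
    have hle : (t.map (fun c => pvE c.1 c.2.1 c.2.2 w01 w02 w12)).foldl min
        (min m (pvE c.1 c.2.1 c.2.2 w01 w02 w12)) ≤ min m (pvE c.1 c.2.1 c.2.2 w01 w02 w12) :=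
      pv_foldl_min_le _ _
    simp only [List.foldl_cons, List.map_cons, List.filter_cons, pvStep]
    by_cases h1 : pvE c.1 c.2.1 c.2.2 w01 w02 w12 < m
    · rw [if_pos h1, ih]
      have hmin : min m (pvE c.1 c.2.1 c.2.2 w01 w02 w12) = pvE c.1 c.2.1 c.2.2 w01 w02 w12 :=
        min_eq_right (le_of_lt h1)
      simp only [hmin] at hle ⊢
      have hne : (t.map (fun c => pvE c.1 c.2.1 c.2.2 w01 w02 w12)).foldl min
          (pvE c.1 c.2.1 c.2.2 w01 w02 w12) ≠ m := by omega
      rw [if_neg hne]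
      by_cases h2 : pvE c.1 c.2.1 c.2.2 w01 w02 w12 =
          (t.map (fun c => pvE c.1 c.2.1 c.2.2 w01 w02 w12)).foldl min
            (pvE c.1 c.2.1 c.2.2 w01 w02 w12)
      · simp [← h2]
      · have hb : (pvE c.1 c.2.1 c.2.2 w01 w02 w12 ==
            (t.map (fun c => pvE c.1 c.2.1 c.2.2 w01 w02 w12)).foldl min
              (pvE c.1 c.2.1 c.2.2 w01 w02 w12)) = false := by simpa using h2
        simp [hb, Ne.symm h2]
    · rw [if_neg h1]
      by_cases h2 : pvE c.1 c.2.1 c.2.2 w01 w02 w12 = m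
      · rw [if_pos h2, ih]
        have hmin : min m (pvE c.1 c.2.1 c.2.2 w01 w02 w12) = m := by omega
        simp only [hmin] at hle ⊢
        by_cases h3 : (t.map (fun c => pvE c.1 c.2.1 c.2.2 w01 w02 w12)).foldl min m = m
        · simp [h3, h2]
        · have : (pvE c.1 c.2.1 c.2.2 w01 w02 w12 ==
              (t.map (fun c => pvE c.1 c.2.1 c.2.2 w01 w02 w12)).foldl min m) = false := by
            simp; omega
          simp [h3, this]
      · rw [if_neg h2, ih]
        have hmin : min m (pvE c.1 c.2.1 c.2.2 w01 w02 w12) = m := by omega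
        simp only [hmin] at hle ⊢
        have : (pvE c.1 c.2.1 c.2.2 w01 w02 w12 ==
            (t.map (fun c => pvE c.1 c.2.1 c.2.2 w01 w02 w12)).foldl min m) = false := by
          simp; omega
        simp [this]

-- A's nested literal loops are the fold of pvStep over pvConfigs
set_option maxHeartbeats 1000000 in
theorem pv_nested_eq (x0 x1 x2 w01 w02 w12 : Int) :
    get_memory x0 x1 x2 w01 w02 w12 =
      (pvConfigs.foldl (pvStep w01 w02 w12) ([], 100000)).1 := by
  simp only [get_memory, pvConfigs, List.flatMap_cons, List.flatMap_nil, List.map_cons,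
    List.map_nil, List.foldl_cons, List.foldl_nil, List.append_nil, List.cons_append,
    List.nil_append]

-- ===== VERDICT (by name: the statement is the Claim_ definition above) =====
theorem get_memory_spec : Claim_equal_get_memory := by
  intro x0 x1 x2 w01 w02 w12 _
  unfold Spec_get_memory
  rw [pv_nested_eq, pv_loop_inv]
  simp [get_memory_alt, List.map_map, List.filter_map, Function.comp_def]
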